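-- pv_equiv track=rewrite | github.com/Pandanila/misis-system-analysis | task4/task.py | parse
-- ===== SOURCE A (Python) =====
-- def parse(text: str) -> dict:
--     s = text.strip()
--     if s.startswith("[") and s.endswith("]"):
--         s = s[1:-1].strip()
--
--     mapping = {}
--     group = 0
--     i = 0
--     length = len(s)
--
--     while i < length:
--         ch = s[i]
--         if ch == "[":
--             j = s.find("]", i)
--             if j == -1:
--                 raise ValueError("Нет закрывающей скобки ']'")
--             inner = s[i + 1:j]
--             tokens = [t.strip() for t in inner.split(",") if t.strip()]
--             for tok in tokens:
--                 mapping[tok] = group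
--             group += 1
--             i = j + 1
--         elif ch == "," or ch.isspace():
--             i += 1
--         else:
--             start = i
--             while i < length and s[i] not in ",[":
--                 i += 1
--             tok = s[start:i].strip()
--             if tok:
--                 mapping[tok] = group
--                 group += 1
--
--     return mapping
-- ===== SOURCE B (Python) =====
-- def parse(text: str) -> dict:
--     s = text.strip()
--     if s.startswith("[") and s.endswith("]"):
--         s = s[1:-1].strip()
--
--     mapping = {}
--     group = 0
--     in_br = False
--     buf = []
--
--     for ch in s:
--         if in_br:
--             if ch == "]":
--                 tok = "".join(buf).strip()
--                 if tok:
--                     mapping[tok] = group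
--                 group += 1
--                 in_br = False
--                 buf = []
--             elif ch == ",":
--                 tok = "".join(buf).strip()
--                 if tok:
--                     mapping[tok] = group
--                 buf = []
--             else:
--                 buf.append(ch)
--         else:
--             if ch == "[":
--                 tok = "".join(buf).strip()
--                 if tok:
--                     mapping[tok] = group
--                     group += 1
--                 in_br = True
--                 buf = []
--             elif ch == ",":
--                 tok = "".join(buf).strip()
--                 if tok:
--                     mapping[tok] = group
--                     group += 1
--                 buf = []
--             else:
--                 buf.append(ch)
--
--     if in_br:
--         raise ValueError("Нет закрывающей скобки ']'")
--     tok = "".join(buf).strip()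
--     if tok:
--         mapping[tok] = group
--     return mapping
-- ===== Notes on version B (the rewrite author's own statement) =====
-- stated objective: alternative
-- what changed: A's index-based scanner (str.find lookahead, slicing, inner split/strip passes) is replaced by a single forward pass over the characters: an explicit state machine with an in-bracket flag and a token buffer that flushes on ',', '[' and ']'.
import Mathlib
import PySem

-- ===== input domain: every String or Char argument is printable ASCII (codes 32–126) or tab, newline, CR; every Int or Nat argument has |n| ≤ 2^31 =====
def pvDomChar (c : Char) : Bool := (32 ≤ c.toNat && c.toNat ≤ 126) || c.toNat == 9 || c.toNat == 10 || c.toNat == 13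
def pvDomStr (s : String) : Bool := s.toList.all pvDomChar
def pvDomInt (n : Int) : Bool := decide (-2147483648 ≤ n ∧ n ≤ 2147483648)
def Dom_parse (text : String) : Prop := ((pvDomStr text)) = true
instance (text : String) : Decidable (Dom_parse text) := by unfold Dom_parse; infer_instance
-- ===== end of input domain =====

-- B replaces A's index/find/slice scanner by a single-pass character state machine
-- (in-bracket flag + token buffer); same return value, alternative structure (no speed claim).

-- ===== PORT A =====
-- A's while loop over index i, as recursion over the remaining suffix of the char list:
-- s.find("]", i) / s[i+1:j] become takeWhile/dropWhile at ']', the inner bare-run scan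
-- becomes takeWhile at ','/'['.  Unclosed '[' (Python: raise ValueError) returns the
-- mapping so far; those inputs are excluded by Pre_parse.
def pvLoopA (m : PySem.Dict String Int) (g : Int) (cs : List Char) : PySem.Dict String Int :=
  match cs with
  | [] => m
  | c :: rest =>
    if c = '[' then
      match h2 : rest.dropWhile (fun x => !(x == ']')) with
      | [] => m   -- Python raises ValueError here; outside Pre_parse
      | _ :: after =>
        let inner := rest.takeWhile (fun x => !(x == ']'))
        let tokens := ((PySem.Chars.splitOn inner [',']).map PySem.Chars.strip).filter (fun t => t ≠ [])
        pvLoopA (tokens.foldl (fun d t => d.insert (String.ofList t) g) m) (g + 1) after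
    else if c = ',' ∨ PySem.Chars.isspace c then
      pvLoopA m g rest
    else
      let run := (c :: rest).takeWhile (fun x => !(x == ',') && !(x == '['))
      let tok := PySem.Chars.strip run
      if tok ≠ [] then
        pvLoopA (m.insert (String.ofList tok) g) (g + 1) ((c :: rest).dropWhile (fun x => !(x == ',') && !(x == '[')))
      else
        pvLoopA m g ((c :: rest).dropWhile (fun x => !(x == ',') && !(x == '[')))
termination_by cs.length
decreasing_by
  · have hle := List.length_dropWhile_le (p := fun x => !(x == ']')) (l := rest)
    rw [h2] at hle; simp at hle ⊢; omega
  · simp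
  · have hle := List.length_dropWhile_le (p := fun x => !(x == ',') && !(x == '[')) (l := c :: rest)
    rw [List.dropWhile_cons_of_pos (by simp_all)] at hle ⊢
    have := List.length_dropWhile_le (p := fun x => !(x == ',') && !(x == '[')) (l := rest)
    simp at this ⊢; omega
  · rw [List.dropWhile_cons_of_pos (by simp_all)]
    have := List.length_dropWhile_le (p := fun x => !(x == ',') && !(x == '[')) (l := rest)
    simp at this ⊢; omega

def parse (text : String) : List (String × Int) :=
  let s := PySem.Chars.strip text.toList
  let s := if PySem.Chars.startswith s ['['] && PySem.Chars.endswith s [']'] then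
             PySem.Chars.strip (PySem.Chars.slice s (some 1) (some (-1))) else s
  (pvLoopA PySem.Dict.empty 0 s).items

-- ===== PORT B =====
-- flush of the current bracket token: map it to the current group if nonempty
def pvFlushTok (m : PySem.Dict String Int) (g : Int) (buf : List Char) : PySem.Dict String Int :=
  let tok := PySem.Chars.strip buf
  if tok = [] then m else m.insert (String.ofList tok) g

-- flush of a bare token: map it and advance the group counter if nonempty
def pvFlushBare (m : PySem.Dict String Int) (g : Int) (buf : List Char) :
    PySem.Dict String Int × Int :=
  let tok := PySem.Chars.strip buf
  if tok = [] then (m, g) else (m.insert (String.ofList tok) g, g + 1)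

-- the state machine: one pass over the characters, state = (mapping, group, in-bracket?, buffer)
def pvLoopB (m : PySem.Dict String Int) (g : Int) (inBr : Bool) (buf : List Char) :
    List Char → PySem.Dict String Int
  | [] => if inBr then m else (pvFlushBare m g buf).1   -- Python B raises ValueError when inBr; outside Pre_parse
  | c :: rest =>
    if inBr then
      if c = ']' then pvLoopB (pvFlushTok m g buf) (g + 1) false [] rest
      else if c = ',' then pvLoopB (pvFlushTok m g buf) g true [] rest
      else pvLoopB m g true (buf ++ [c]) rest
    else
      if c = '[' then pvLoopB (pvFlushBare m g buf).1 (pvFlushBare m g buf).2 true [] rest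
      else if c = ',' then pvLoopB (pvFlushBare m g buf).1 (pvFlushBare m g buf).2 false [] rest
      else pvLoopB m g false (buf ++ [c]) rest

def parse_alt (text : String) : List (String × Int) :=
  let s := PySem.Chars.strip text.toList
  let s := if PySem.Chars.startswith s ['['] && PySem.Chars.endswith s [']'] then
             PySem.Chars.strip (PySem.Chars.slice s (some 1) (some (-1))) else s
  (pvLoopB PySem.Dict.empty 0 false [] s).items

-- ===== PRECONDITION & SPEC =====
-- the preprocessed character list both programs scan (A's outer-strip preamble)
def pvPrep (text : String) : List Char :=
  let s := PySem.Chars.strip text.toList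
  if PySem.Chars.startswith s ['['] && PySem.Chars.endswith s [']'] then
    PySem.Chars.strip (PySem.Chars.slice s (some 1) (some (-1))) else s

-- Pre_parse excludes exactly the inputs where A raises ValueError (an unclosed '['):
-- after the outer-strip preamble, no '[' may occur after the last ']'.
def Pre_parse (text : String) : Prop :=
  '[' ∉ (pvPrep text).reverse.takeWhile (fun x => !(x == ']'))
instance (text : String) : Decidable (Pre_parse text) := by unfold Pre_parse; infer_instance

def pvWitness_parse : String := "x1 ,[a, b],[c],d"

def Spec_parse (text : String) (out : List (String × Int)) : Prop := out = parse_alt text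
instance (text : String) (out : List (String × Int)) : Decidable (Spec_parse text out) := by unfold Spec_parse; infer_instance

-- ===== CLAIM (what is proved, stated in full; the proofs are below) =====
def Claim_equal_parse : Prop := ∀ (text : String), Dom_parse text → Pre_parse text → Spec_parse text (parse text)

-- ===== LEMMAS AND PROOFS =====

-- no-orphan-'[' property in quantifier form, used through the induction
def pvOk (cs : List Char) : Prop := ∀ l r : List Char, cs = l ++ '[' :: r → ']' ∈ r

theorem pvOk_suffix {cs s : List Char} (h : pvOk cs) (hs : s <:+ cs) : pvOk s := by
  obtain ⟨a, rfl⟩ := hs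
  intro l r hr
  exact h (a ++ l) r (by simp [hr])

theorem pvOk_of_pre {cs : List Char}
    (h : '[' ∉ cs.reverse.takeWhile (fun x => !(x == ']'))) : pvOk cs := by
  intro l r hcs
  by_contra hr
  apply h
  have hrev : cs.reverse = r.reverse ++ '[' :: l.reverse := by simp [hcs]
  have hall : ∀ x ∈ r.reverse, (fun x => !(x == ']')) x = true := by
    intro x hx; simp only [List.mem_reverse] at hx
    simp; rintro rfl; exact hr hx
  rw [hrev, List.takeWhile_append_of_pos hall, List.takeWhile_cons_of_pos (by simp)]
  simp

-- whitespace-only buffers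
theorem pvStrip_nil_of_space {buf : List Char} (h : ∀ c ∈ buf, PySem.Chars.isspace c) :
    PySem.Chars.strip buf = [] := by
  have h1 : PySem.Chars.lstrip buf = [] := by
    simp [PySem.Chars.lstrip, List.dropWhile_eq_nil_iff]; exact h
  simp [PySem.Chars.strip, h1, PySem.Chars.rstrip]

theorem pvStrip_append_space {buf x : List Char} (h : ∀ c ∈ buf, PySem.Chars.isspace c) :
    PySem.Chars.strip (buf ++ x) = PySem.Chars.strip x := by
  have h1 : PySem.Chars.lstrip (buf ++ x) = PySem.Chars.lstrip x := by
    simp [PySem.Chars.lstrip, List.dropWhile_append, List.dropWhile_eq_nil_iff.mpr h]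
  simp [PySem.Chars.strip, h1]

-- comma splitting, in structural form
def pvSplit : List Char → List (List Char)
  | [] => [[]]
  | c :: r => if c = ',' then [] :: pvSplit r else (pvSplit r).modifyHead (c :: ·)

theorem pvSplit_ne_nil (l : List Char) : pvSplit l ≠ [] := by
  induction l with
  | nil => simp [pvSplit]
  | cons c r ih =>
    simp only [pvSplit]
    split
    · simp
    · cases h : pvSplit r with
      | nil => exact absurd h ih
      | cons p t => simp [List.modifyHead]

theorem pvGo_spec : ∀ (fuel : Nat) (l cur : List Char) (acc : List (List Char)) (_ : l.length < fuel),
    PySem.Chars.splitOn.go [','] fuel l cur acc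
      = acc.reverse ++ (pvSplit l).modifyHead (cur.reverse ++ ·) := by
  intro fuel
  induction fuel with
  | zero => intro l cur acc h; omega
  | succ fuel ih =>
    intro l cur acc h
    cases l with
    | nil => simp [PySem.Chars.splitOn.go, pvSplit]
    | cons c rest =>
      by_cases hc : c = ','
      · subst hc
        rw [PySem.Chars.splitOn.go]
        simp only [List.isPrefixOf, BEq.rfl, Bool.true_and, if_true, List.length_cons,
          List.drop_succ_cons, List.drop_zero, List.length_nil]
        rw [ih rest [] (List.reverse cur :: acc) (by simp at h; omega)]
        cases hs : pvSplit rest with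
        | nil => exact absurd hs (pvSplit_ne_nil rest)
        | cons p t => simp [pvSplit, hs, List.modifyHead]
      · rw [PySem.Chars.splitOn.go]
        have : ([','].isPrefixOf (c :: rest)) = false := by
          simp [List.isPrefixOf]; exact fun hh => absurd hh.symm hc
        rw [this]
        simp only [Bool.false_eq_true, if_false]
        rw [ih rest (c :: cur) acc (by simp at h; omega)]
        cases hs : pvSplit rest with
        | nil => exact absurd hs (pvSplit_ne_nil rest)
        | cons p t => simp [pvSplit, hs, hc, List.modifyHead]

theorem pvSplitOn_eq (s : List Char) : PySem.Chars.splitOn s [','] = pvSplit s := by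
  rw [PySem.Chars.splitOn, pvGo_spec (s.length + 1) s [] [] (by omega)]
  cases hs : pvSplit s with
  | nil => exact absurd hs (pvSplit_ne_nil s)
  | cons p t => simp

theorem pvSplit_append {b r : List Char} (hb : ',' ∉ b) :
    pvSplit (b ++ ',' :: r) = b :: pvSplit r := by
  induction b with
  | nil => simp [pvSplit]
  | cons c t ih =>
    simp at hb
    rw [List.cons_append, pvSplit, if_neg (by simpa using (Ne.symm hb.1)), ih hb.2]
    simp [List.modifyHead]

theorem pvSplit_nocomma {b : List Char} (hb : ',' ∉ b) : pvSplit b = [b] := by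
  induction b with
  | nil => simp [pvSplit]
  | cons c t ih =>
    simp at hb
    rw [pvSplit, if_neg (by simpa using (Ne.symm hb.1)), ih hb.2]
    simp [List.modifyHead]

-- A's insertion of all (stripped, nonempty) tokens of a comma-separated chunk
def pvInsT (m : PySem.Dict String Int) (g : Int) (l : List Char) : PySem.Dict String Int :=
  (((pvSplit l).map PySem.Chars.strip).filter (fun t => t ≠ [])).foldl
    (fun d t => d.insert (String.ofList t) g) m

theorem pvInsT_nocomma {b : List Char} (hb : ',' ∉ b) (m : PySem.Dict String Int) (g : Int) :
    pvInsT m g b = pvFlushTok m g b := by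
  rw [pvInsT, pvSplit_nocomma hb, pvFlushTok]
  by_cases hs : PySem.Chars.strip b = [] <;> simp [hs]

theorem pvInsT_comma {b t : List Char} (hb : ',' ∉ b) (m : PySem.Dict String Int) (g : Int) :
    pvInsT m g (b ++ ',' :: t) = pvInsT (pvFlushTok m g b) g t := by
  rw [pvInsT, pvSplit_append hb, pvInsT, pvFlushTok]
  by_cases hs : PySem.Chars.strip b = [] <;> simp [hs]

-- B inside a bracket consumes inner ++ ']' :: after exactly as A's bulk token insertion
theorem pvBrk : ∀ {inner : List Char}, ']' ∉ inner →
    ∀ (buf : List Char), ',' ∉ buf → ']' ∉ buf →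
    ∀ (m : PySem.Dict String Int) (g : Int) (after : List Char),
    pvLoopB m g true buf (inner ++ ']' :: after)
      = pvLoopB (pvInsT m g (buf ++ inner)) (g + 1) false [] after := by
  intro inner
  induction inner with
  | nil =>
    intro _ buf hbc _ m g after
    rw [List.nil_append, pvLoopB, if_pos rfl, if_pos rfl, List.append_nil,
      pvInsT_nocomma hbc]
  | cons d t ih =>
    intro hin buf hbc hbr m g after
    simp at hin
    by_cases hd : d = ','
    · subst hd
      rw [List.cons_append, pvLoopB, if_pos rfl, if_neg (fun hh => hin.1 hh.symm), if_pos rfl,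
        ih hin.2 [] (by simp) (by simp), pvInsT_comma hbc]
      simp
    · rw [List.cons_append, pvLoopB, if_pos rfl, if_neg (fun hh => hin.1 hh.symm), if_neg hd,
        ih hin.2 (buf ++ [d]) (by simp [hbc, Ne.symm hd]) (by simp [hbr]; exact fun hh => hin.1 hh)]
      simp

-- B outside a bracket accumulates a delimiter-free run into the buffer
theorem pvRun {run : List Char} (h : ∀ x ∈ run, x ≠ ',' ∧ x ≠ '[') :
    ∀ (buf : List Char) (m : PySem.Dict String Int) (g : Int) (rest : List Char),
    pvLoopB m g false buf (run ++ rest) = pvLoopB m g false (buf ++ run) rest := by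
  induction run with
  | nil => simp
  | cons c t ih =>
    intro buf m g rest
    have hc := h c (by simp)
    rw [List.cons_append, pvLoopB, if_neg (by simp), if_neg hc.2, if_neg hc.1,
      ih (fun x hx => h x (by simp [hx])) (buf ++ [c])]
    simp

-- main simulation: A's scanner = B's state machine (buffer holding only whitespace)
theorem pvMain : ∀ (n : Nat) (cs : List Char), cs.length ≤ n → pvOk cs →
    ∀ (m : PySem.Dict String Int) (g : Int) (buf : List Char),
    (∀ c ∈ buf, PySem.Chars.isspace c) →
    pvLoopA m g cs = pvLoopB m g false buf cs := by
  intro n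
  induction n with
  | zero =>
    intro cs hlen _ m g buf hbuf
    have : cs = [] := by cases cs <;> simp_all
    subst this
    rw [pvLoopA, pvLoopB]
    simp [pvFlushBare, pvStrip_nil_of_space hbuf]
  | succ n ih =>
    intro cs hlen hok m g buf hbuf
    cases cs with
    | nil =>
      rw [pvLoopA, pvLoopB]
      simp [pvFlushBare, pvStrip_nil_of_space hbuf]
    | cons c rest =>
      by_cases hc : c = '['
      · -- bracket group
        subst hc
        have hmem : ']' ∈ rest := hok [] rest rfl
        have hd2 : rest.dropWhile (fun x => !(x == ']')) ≠ [] := by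
          intro hnil
          rw [List.dropWhile_eq_nil_iff] at hnil
          have := hnil ']' hmem
          simp at this
        cases h2 : rest.dropWhile (fun x => !(x == ']')) with
        | nil => exact absurd h2 hd2
        | cons d after =>
          have hd : d = ']' := by
            have h1 := List.head_dropWhile_not (fun x => !(x == ']')) (l := rest)
              (by rw [h2]; simp)
            have hh : (rest.dropWhile (fun x => !(x == ']'))).head (by rw [h2]; simp) = d := by
              simp [h2]
            rw [hh] at h1
            simpa using h1
          subst hd
          have hrest : rest = rest.takeWhile (fun x => !(x == ']')) ++ ']' :: after := by
            conv_lhs => rw [← List.takeWhile_append_dropWhile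
              (p := fun x => !(x == ']')) (l := rest)]
            rw [h2]
          have hin : ']' ∉ rest.takeWhile (fun x => !(x == ']')) := by
            intro hmm
            have := List.mem_takeWhile_imp hmm
            simp at this
          have hlen2 : after.length ≤ n := by
            have := congrArg List.length hrest
            simp at this ⊢
            simp at hlen
            omega
          have hok2 : pvOk after :=
            pvOk_suffix hok ⟨'[' :: (rest.takeWhile (fun x => !(x == ']')) ++ [']']),
              by simp [← hrest]⟩
          -- A's step
          rw [pvLoopA, if_pos rfl]
          split
          · rename_i heq0
            exact absurd heq0 hd2
          · rename_i d' after' heq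
            rw [h2] at heq
            cases heq
            -- B's step
            rw [pvLoopB, if_neg (by simp), if_pos rfl]
            simp only [pvFlushBare, pvStrip_nil_of_space hbuf, reduceIte]
            conv_rhs => rw [hrest]
            rw [pvBrk hin [] (by simp) (by simp) m g after]
            simp only [List.nil_append]
            rw [← ih after hlen2 hok2 _ _ [] (by simp)]
            rw [pvSplitOn_eq]
            rfl
      · by_cases hc2 : c = ','
        · -- comma separator
          subst hc2
          rw [pvLoopA, if_neg hc, if_pos (Or.inl rfl),
            pvLoopB, if_neg (by simp), if_neg (by simp : ¬(',' = '[')), if_pos rfl]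
          simp only [pvFlushBare, pvStrip_nil_of_space hbuf, reduceIte]
          exact ih rest (by simpa using hlen) (pvOk_suffix hok ⟨[','], rfl⟩) m g [] (by simp)
        · by_cases hsp : PySem.Chars.isspace c
          · -- whitespace outside any token
            rw [pvLoopA, if_neg hc, if_pos (Or.inr hsp),
              pvLoopB, if_neg (by simp), if_neg hc, if_neg hc2]
            exact ih rest (by simpa using hlen) (pvOk_suffix hok ⟨[c], rfl⟩) m g (buf ++ [c])
              (by intro x hx; rcases List.mem_append.1 hx with h | h
                  · exact hbuf x h
                  · simp at h; subst h; exact hsp)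
          · -- bare token
            have hqc : (fun x => !(x == ',') && !(x == '[')) c = true := by simp [hc, hc2]
            have hrun : (c :: rest).takeWhile (fun x => !(x == ',') && !(x == '['))
                = c :: rest.takeWhile (fun x => !(x == ',') && !(x == '[')) :=
              List.takeWhile_cons_of_pos hqc
            have hdrop : (c :: rest).dropWhile (fun x => !(x == ',') && !(x == '['))
                = rest.dropWhile (fun x => !(x == ',') && !(x == '[')) :=
              List.dropWhile_cons_of_pos hqc
            generalize hrundef : (c :: rest).takeWhile (fun x => !(x == ',') && !(x == '[')) = run
            generalize hr2def : (c :: rest).dropWhile (fun x => !(x == ',') && !(x == '[')) = rest2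
            have hsplit : run ++ rest2 = c :: rest := by
              rw [← hrundef, ← hr2def]
              exact List.takeWhile_append_dropWhile
            have hmemrun : ∀ x ∈ run, x ≠ ',' ∧ x ≠ '[' := by
              intro x hx
              rw [← hrundef] at hx
              have := List.mem_takeWhile_imp hx
              simp at this
              exact this
            have hlen2 : rest2.length ≤ n := by
              rw [← hr2def, hdrop]
              have := List.length_dropWhile_le (p := fun x => !(x == ',') && !(x == '[')) (l := rest)
              simp at hlen
              omega
            have hok2 : pvOk rest2 := by
              rw [← hr2def]
              exact pvOk_suffix hok (List.dropWhile_suffix _)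
            -- A's step, phrased through pvFlushBare
            have hAstep : pvLoopA m g (c :: rest)
                = pvLoopA (pvFlushBare m g run).1 (pvFlushBare m g run).2 rest2 := by
              rw [pvLoopA, if_neg hc, if_neg (by rw [not_or]; exact ⟨hc2, hsp⟩)]
              simp only [hrundef, hr2def]
              by_cases ht : PySem.Chars.strip run = []
              · rw [if_neg (by simp [ht]), pvFlushBare, ht]
                simp
              · rw [if_pos (by simp [ht]), pvFlushBare]
                simp [ht]
            -- B reads the run into the buffer
            have hBrun : pvLoopB m g false buf (c :: rest)
                = pvLoopB m g false (buf ++ run) rest2 := by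
              rw [← hsplit, pvRun hmemrun]
            -- flushing buf ++ run = flushing run  (buf is whitespace)
            have hms : pvFlushBare m g (buf ++ run) = pvFlushBare m g run := by
              rw [pvFlushBare, pvFlushBare, pvStrip_append_space hbuf]
            -- stepping both machines over rest2's head
            have hstep : pvLoopB m g false (buf ++ run) rest2
                = pvLoopB (pvFlushBare m g run).1 (pvFlushBare m g run).2 false [] rest2 := by
              cases h2 : rest2 with
              | nil =>
                rw [pvLoopB, pvLoopB, hms]
                have hnil : PySem.Chars.strip ([] : List Char) = [] := by
                  simp [PySem.Chars.strip, PySem.Chars.lstrip, PySem.Chars.rstrip]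
                by_cases ht : PySem.Chars.strip run = [] <;> simp [pvFlushBare, ht, hnil]
              | cons d after =>
                have hdc : (c :: rest).dropWhile (fun x => !(x == ',') && !(x == '[')) = d :: after := by
                  rw [hr2def, h2]
                have hdq : (fun x => !(x == ',') && !(x == '[')) d = false := by
                  have h1 := List.head_dropWhile_not (fun x => !(x == ',') && !(x == '['))
                    (l := c :: rest) (by rw [hdc]; simp)
                  have hh : ((c :: rest).dropWhile (fun x => !(x == ',') && !(x == '['))).head
                      (by rw [hdc]; simp) = d := by
                    simp [hdc]
                  rw [hh] at h1
                  exact h1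
                have hd : d = ',' ∨ d = '[' := by
                  by_cases h : d = ',' 
                  · exact Or.inl h
                  · right
                    simpa [h] using hdq
                rcases hd with hd | hd <;> subst hd
                · rw [pvLoopB, if_neg (by simp), if_neg (by simp : ¬(',' = '[')), if_pos rfl,
                    pvLoopB, if_neg (by simp), if_neg (by simp : ¬(',' = '[')), if_pos rfl, hms]
                  congr 1
                · rw [pvLoopB, if_neg (by simp), if_pos rfl,
                    pvLoopB, if_neg (by simp), if_pos rfl, hms]
                  congr 1
            rw [hAstep, hBrun, hstep,
              ih rest2 hlen2 hok2 (pvFlushBare m g run).1 (pvFlushBare m g run).2 [] (by simp)]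

-- ===== VERDICT (by name: the statement is the Claim_ definition above) =====
theorem parse_spec : Claim_equal_parse := by
  intro text _ hpre
  unfold Spec_parse parse parse_alt
  have := pvMain (pvPrep text).length (pvPrep text) le_rfl (pvOk_of_pre hpre)
    PySem.Dict.empty 0 [] (by simp)
  simpa [pvPrep] using congrArg PySem.Dict.items this
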